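-- pv_equiv track=rewrite | github.com/wolfy916/Algorithm | Algorithm_Solution/BOJ_python/bk_20437.py | solution
-- ===== SOURCE A (Python) =====
-- def solution(W, K):
--     # ref['a'] = [a가 위치한 인덱스들]
--     ref = {}
--     for i in range(len(W)):
--         ref.setdefault(W[i], []).append(i)
--
--     answer = [10001, 0]
--     for v in ref.values():
--         # 같은 문자 K개를 만족못하면 continue
--         if len(v) < K: continue
--         # K가 1이면 탐색할 필요가 없음
--         if K == 1:
--             answer = [1, 1]
--             break
--         else:
--             # 길이 갱신
--             idx = 0
--             while idx + K - 1 < len(v):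
--                 lenV = v[idx + K - 1] - v[idx] + 1
--                 answer[0] = min(answer[0], lenV)
--                 answer[1] = max(answer[1], lenV)
--                 idx += 1
--     return answer if answer[0] < 10001 else [-1]
-- ===== SOURCE B (Python) =====
-- def solution(W, K):
--     # One pass: record each char's positions as they stream by; once a char has
--     # at least K occurrences, the span ending here is i - positions[-K] + 1.
--     pos = {}
--     lo, hi = 10001, 0
--     for i, c in enumerate(W):
--         buf = pos.setdefault(c, [])
--         buf.append(i)
--         if len(buf) >= K:
--             span = i - buf[-K] + 1
--             if span < lo:
--                 lo = span
--             if span > hi: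
--                 hi = span
--     return [lo, hi] if lo < 10001 else [-1]
-- ===== Notes on version B (the rewrite author's own statement) =====
-- stated objective: alternative
-- what changed: Replaces A's two-phase scheme (build a complete per-char index table, then a nested while-loop sliding a K-window over each index list, with a K==1 shortcut and break) by a single streaming pass over W that appends each position to its char's list and, once the char has K occurrences, looks back with buf[-K] to update a running min/max; no second phase, no inner window loop and no K==1 special case.
import Mathlib
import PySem

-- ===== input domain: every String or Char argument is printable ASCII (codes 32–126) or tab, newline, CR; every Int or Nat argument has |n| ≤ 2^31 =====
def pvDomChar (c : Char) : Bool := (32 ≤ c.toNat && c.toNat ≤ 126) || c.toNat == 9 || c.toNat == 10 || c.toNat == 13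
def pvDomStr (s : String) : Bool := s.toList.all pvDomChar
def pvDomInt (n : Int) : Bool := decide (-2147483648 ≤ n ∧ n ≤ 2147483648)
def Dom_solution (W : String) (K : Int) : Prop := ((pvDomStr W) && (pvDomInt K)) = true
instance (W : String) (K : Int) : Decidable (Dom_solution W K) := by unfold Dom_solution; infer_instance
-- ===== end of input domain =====

-- B replaces A's two-phase scheme (full per-char index table, then a nested window scan per list,
-- plus a K==1 shortcut) by a single streaming pass that looks back K positions per char; alternative, same cost.

-- ===== PORT A =====
-- inner 'while idx + K - 1 < len(v)' loop of A over answer = (a0, a1);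
-- a pyGet? miss models Python's IndexError (reachable only outside Pre_)
def aInner (v : List Int) (K : Int) (idx : Nat) (a0 a1 : Int) : Int × Int :=
  if (idx : Int) + K - 1 < (v.length : Int) then
    match h2 : PySem.List.pyGet? v ((idx : Int) + K - 1), h3 : PySem.List.pyGet? v (idx : Int) with
    | some x, some y =>
        aInner v K (idx + 1) (min a0 (x - y + 1)) (max a1 (x - y + 1))
    | _, _ => (a0, a1)
  else (a0, a1)
termination_by v.length + 1 - idx
decreasing_by
  have hidx : idx < v.length := by
    rw [PySem.List.pyGet?_natCast v idx] at h3
    exact (List.getElem?_eq_some_iff.mp h3).1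
  omega

-- 'for v in ref.values()' loop of A, with the K == 1 break
def aLoop (K : Int) : List (List Int) → Int → Int → Int × Int
  | [], a0, a1 => (a0, a1)
  | v :: rest, a0, a1 =>
    if (v.length : Int) < K then aLoop K rest a0 a1
    else if K == 1 then (1, 1)
    else
      let p := aInner v K 0 a0 a1
      aLoop K rest p.1 p.2

def solution (W : String) (K : Int) : List Int :=
  let ref := (PySem.List.enumerate W.toList).foldl
      (fun d p => d.modify p.2 [] (fun t => t ++ [p.1])) PySem.Dict.empty
  let a := aLoop K ref.values 10001 0
  if a.1 < 10001 then [a.1, a.2] else [-1]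

-- ===== PORT B =====
-- single pass: each char's positions accumulate in 'd'; running (lo, hi);
-- the pyGet? miss models Python's IndexError on buf[-K] (reachable only outside Pre_, at K < 0)
def bLoop (K : Int) : List (Int × Char) → PySem.Dict Char (List Int) → Int → Int → Int × Int
  | [], _, lo, hi => (lo, hi)
  | x :: rest, d, lo, hi =>
    let buf1 := d.getD x.2 [] ++ [x.1]
    let d' := d.insert x.2 buf1
    if (buf1.length : Int) ≥ K then
      match PySem.List.pyGet? buf1 (-K) with
      | some b0 =>
          let span := x.1 - b0 + 1
          bLoop K rest d' (if span < lo then span else lo) (if span > hi then span else hi)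
      | none => (lo, hi)
    else bLoop K rest d' lo hi

def solution_alt (W : String) (K : Int) : List Int :=
  let r := bLoop K (PySem.List.enumerate W.toList) PySem.Dict.empty 10001 0
  if r.1 < 10001 then [r.1, r.2] else [-1]

-- ===== PRECONDITION & SPEC =====
-- Pre_ excludes K ≤ 0 with nonempty W, where A raises IndexError in its window scan.
def Pre_solution (W : String) (K : Int) : Prop := 1 ≤ K ∨ W.toList = []
instance (W : String) (K : Int) : Decidable (Pre_solution W K) := by unfold Pre_solution; infer_instance
def pvWitness_solution : String × Int := ("aabcaa", 2)

def Spec_solution (W : String) (K : Int) (out : List Int) : Prop := out = solution_alt W K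
instance (W : String) (K : Int) (out : List Int) : Decidable (Spec_solution W K out) := by unfold Spec_solution; infer_instance

-- ===== CLAIM (what is proved, stated in full; the proofs are below) =====
def Claim_equal_solution : Prop := ∀ (W : String) (K : Int), Dom_solution W K → Pre_solution W K → Spec_solution W K (solution W K)

-- ===== LEMMAS AND PROOFS =====

-- indices at which character c occurs, from an enumerated prefix/list
def occ (l : List (Int × Char)) (c : Char) : List Int :=
  (l.filter (fun p => p.2 == c)).map (fun p => p.1)

-- all K-window spans of an occurrence list
def spans (k : Nat) (v : List Int) : List Int :=
  (List.range (v.length + 1 - k)).map (fun j => v.getD (j + k - 1) 0 - v.getD j 0 + 1)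

-- running (min, max) fold
def mm (a : Int × Int) (S : List Int) : Int × Int :=
  S.foldl (fun p s => (min p.1 s, max p.2 s)) a

-- every span of every character, grouped by first occurrence of the character
def allSpans (k : Nat) (l : List (Int × Char)) : List Int :=
  (PySem.Set.ofList (l.map (fun p => p.2))).flatMap (fun c => spans k (occ l c))

theorem mm_nil (a : Int × Int) : mm a [] = a := rfl

theorem mm_cons (a : Int × Int) (s : Int) (S : List Int) :
    mm a (s :: S) = mm (min a.1 s, max a.2 s) S := rfl

theorem mm_append (a : Int × Int) (S T : List Int) : mm a (S ++ T) = mm (mm a S) T := by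
  simp [mm, List.foldl_append]

theorem mm_perm {S T : List Int} (h : S.Perm T) (a : Int × Int) : mm a S = mm a T := by
  induction h generalizing a with
  | nil => rfl
  | cons x _ ih => rw [mm_cons, mm_cons, ih]
  | swap x y l =>
      rw [mm_cons, mm_cons, mm_cons, mm_cons]
      congr 2
      · exact min_right_comm a.1 y x
      · exact max_right_comm a.2 y x
  | trans _ _ ih1 ih2 => rw [ih1, ih2]

theorem spans_nil_of_lt {k : Nat} {v : List Int} (h : v.length < k) : spans k v = [] := by
  have : v.length + 1 - k = 0 := by omega
  simp [spans, this]

theorem if_lt_eq_min (a s : Int) : (if s < a then s else a) = min a s := by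
  rw [min_def]; split_ifs <;> omega

theorem if_gt_eq_max (a s : Int) : (if s > a then s else a) = max a s := by
  rw [max_def]; split_ifs <;> omega

theorem spans_append {k : Nat} (hk : 1 ≤ k) {v : List Int} (h : k ≤ v.length + 1) (i : Int) :
    spans k (v ++ [i]) = spans k v ++ [i - (v ++ [i]).getD (v.length + 1 - k) 0 + 1] := by
  unfold spans
  have hlen : (v ++ [i]).length = v.length + 1 := by simp
  rw [hlen]
  have hn : v.length + 1 + 1 - k = (v.length + 1 - k) + 1 := by omega
  rw [hn, List.range_succ, List.map_append]
  congr 1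
  · apply List.map_congr_left
    intro j hj
    rw [List.mem_range] at hj
    have h1 : j + k - 1 < v.length := by omega
    have h2 : j < v.length := by omega
    rw [List.getD_append _ _ _ _ h1, List.getD_append _ _ _ _ h2]
  · simp only [List.map_cons, List.map_nil]
    have he : v.length + 1 - k + k - 1 = v.length := by omega
    rw [he]
    have hv : (v ++ [i]).getD v.length 0 = i := by
      rw [List.getD_eq_getElem?_getD, List.getElem?_concat_length]; rfl
    rw [hv]

theorem spans_one_all_ones {v : List Int} {x : Int} (hx : x ∈ spans 1 v) : x = 1 := by
  simp only [spans] at hx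
  rw [List.mem_map] at hx
  obtain ⟨j, hj, rfl⟩ := hx
  simp

theorem occ_append (l : List (Int × Char)) (x : Int × Char) (c : Char) :
    occ (l ++ [x]) c = occ l c ++ (if x.2 == c then [x.1] else []) := by
  simp only [occ, List.filter_append, List.map_append]
  congr 1
  by_cases h : x.2 == c <;> simp [h]

theorem occ_of_not_mem {l : List (Int × Char)} {c : Char} (h : c ∉ l.map (fun p => p.2)) :
    occ l c = [] := by
  simp only [occ, List.map_eq_nil_iff, List.filter_eq_nil_iff]
  intro p hp hc
  exact h (List.mem_map.mpr ⟨p, hp, eq_of_beq hc⟩)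

theorem occ_enumerate_length (c : Char) : ∀ (l : List Char) (s : Int),
    (occ (PySem.List.enumerate l s) c).length = l.count c := by
  intro l
  induction l with
  | nil => intro s; rfl
  | cons ch t ih =>
      intro s
      rw [PySem.List.enumerate_cons]
      have hih := ih (s+1)
      simp only [occ] at hih ⊢
      by_cases h : ch = c
      · simp [h, hih]
      · simp [h, hih]

theorem getD_build (c : Char) : ∀ (l : List (Int × Char)) (d : PySem.Dict Char (List Int)),
    (l.foldl (fun d p => d.modify p.2 [] (fun t => t ++ [p.1])) d).getD c [] = d.getD c [] ++ occ l c := by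
  intro l
  induction l with
  | nil => intro d; simp [occ]
  | cons p t ih =>
      intro d
      rw [List.foldl_cons, ih]
      rw [PySem.Dict.getD_modify]
      simp only [occ, List.filter_cons]
      by_cases h : c = p.2
      · have hb : (p.2 == c) = true := by simp [h]
        simp [h]
      · have hb : (p.2 == c) = false := by simp [(Ne.symm h)]
        simp [h, hb]

theorem ref_values (l : List Char) :
    ((PySem.List.enumerate l).foldl (fun d p => d.modify p.2 [] (fun t => t ++ [p.1]))
        PySem.Dict.empty).values
      = (PySem.Set.ofList l).map (fun c => occ (PySem.List.enumerate l) c) := by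
  have hkeys : ((PySem.List.enumerate l).foldl (fun d p => d.modify p.2 [] (fun t => t ++ [p.1]))
      PySem.Dict.empty).keys = PySem.Set.ofList l := by
    rw [PySem.Dict.keys_foldl_modify_key (PySem.List.enumerate l) (fun p => p.2) []
      (fun _ p => fun t => t ++ [p.1]) PySem.Dict.empty]
    rw [PySem.Dict.keys_empty, PySem.Set.update_nil_left, PySem.List.map_snd_enumerate]
  have hnodup := PySem.Dict.nodup_keys_foldl_modify_key (PySem.List.enumerate l) (fun p => p.2) []
      (fun _ p => fun t => t ++ [p.1]) PySem.Dict.empty PySem.Dict.nodup_keys_empty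
  rw [PySem.Dict.values_eq_map_keys _ hnodup [], hkeys]
  apply List.map_congr_left
  intro c _
  rw [getD_build]
  simp [PySem.Dict.getD_empty]

theorem flatMap_update_perm {f f' : Char → List Int} {c : Char} {extra : List Int} :
    ∀ (L : List Char), L.Nodup → c ∈ L → f' c = f c ++ extra →
    (∀ d ∈ L, d ≠ c → f' d = f d) →
    (L.flatMap f').Perm (L.flatMap f ++ extra) := by
  intro L
  induction L with
  | nil => intro _ hc; exact absurd hc (List.not_mem_nil)
  | cons e L' ih =>
      intro hnd hc hfc hne
      rw [List.nodup_cons] at hnd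
      rw [List.flatMap_cons, List.flatMap_cons]
      by_cases he : e = c
      · subst he
        have hrest : L'.flatMap f' = L'.flatMap f := by
          apply List.flatMap_congr
          intro d hd
          exact hne d (by simp [hd]) (fun hdc => hnd.1 (hdc ▸ hd))
        rw [hrest, hfc, List.append_assoc, List.append_assoc]
        exact (List.perm_append_comm).append_left (f e)
      · have hcL : c ∈ L' := by
          rcases List.mem_cons.mp hc with h | h
          · exact absurd h.symm he
          · exact h
        have hp := ih hnd.2 hcL hfc (fun d hd hdc => hne d (by simp [hd]) hdc)
        rw [hne e (by simp) he, List.append_assoc]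
        exact hp.append_left (f e)

theorem aInner_eq {k : Nat} (hk : 1 ≤ k) (v : List Int) :
    ∀ (idx : Nat) (a0 a1 : Int), aInner v (k : Int) idx a0 a1 = mm (a0, a1) ((spans k v).drop idx) := by
  have spanlen : (spans k v).length = v.length + 1 - k := by simp [spans]
  have main : ∀ (n idx : Nat), v.length ≤ idx + n → ∀ a0 a1 : Int,
      aInner v (k : Int) idx a0 a1 = mm (a0, a1) ((spans k v).drop idx) := by
    intro n
    induction n with
    | zero =>
        intro idx hle a0 a1
        rw [aInner]
        have hguard : ¬((idx : Int) + (k : Int) - 1 < (v.length : Int)) := by omega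
        rw [if_neg hguard]
        rw [List.drop_eq_nil_of_le (by omega), mm_nil]
    | succ n ihn =>
        intro idx hle a0 a1
        rw [aInner]
        by_cases hguard : ((idx : Int) + (k : Int) - 1 < (v.length : Int))
        · rw [if_pos hguard]
          have hidx : idx + k - 1 < v.length := by omega
          have hidx2 : idx < v.length := by omega
          have hcast : ((idx + k - 1 : Nat) : Int) = (idx : Int) + (k : Int) - 1 := by omega
          have e1 : PySem.List.pyGet? v ((idx : Int) + (k : Int) - 1) = some v[idx + k - 1] := by
            rw [← hcast, PySem.List.pyGet?_natCast, List.getElem?_eq_getElem hidx]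
          have e2 : PySem.List.pyGet? v ((idx : Nat) : Int) = some v[idx] := by
            rw [PySem.List.pyGet?_natCast, List.getElem?_eq_getElem hidx2]
          have hidx3 : idx < (spans k v).length := by omega
          have hsp : (spans k v)[idx] = v[idx + k - 1] - v[idx] + 1 := by
            simp only [spans, List.getElem_map, List.getElem_range]
            rw [List.getD_eq_getElem v 0 (by omega), List.getD_eq_getElem v 0 (by omega)]
          split
          · rename_i x y h2 h3
            rw [e1] at h2
            rw [e2] at h3
            obtain rfl : x = v[idx + k - 1] := by injection h2 with h; exact h.symm
            obtain rfl : y = v[idx] := by injection h3 with h; exact h.symm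
            rw [List.drop_eq_getElem_cons hidx3, hsp, mm_cons]
            exact ihn (idx + 1) (by omega) _ _
          · rename_i h
            exact absurd (h v[idx + k - 1] v[idx] e1 e2) (fun hF => hF)
        · rw [if_neg hguard]
          rw [List.drop_eq_nil_of_le (by omega), mm_nil]
  intro idx a0 a1
  exact main v.length idx (by omega) a0 a1

theorem aLoop_eq {k : Nat} (hk : 2 ≤ k) :
    ∀ (vs : List (List Int)) (a0 a1 : Int),
      aLoop (k : Int) vs a0 a1 = mm (a0, a1) (vs.flatMap (fun v => spans k v)) := by
  intro vs
  induction vs with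
  | nil => intro a0 a1; rfl
  | cons v rest ih =>
      intro a0 a1
      rw [List.flatMap_cons, aLoop]
      by_cases hlen : ((v.length : Int) < (k : Int))
      · rw [if_pos hlen]
        rw [spans_nil_of_lt (by omega), List.nil_append]
        exact ih a0 a1
      · rw [if_neg hlen]
        have hne : (((k : Nat) : Int) == 1) = false := by
          simp only [beq_eq_false_iff_ne, ne_eq]
          omega
        rw [hne]
        simp only [Bool.false_eq_true, if_false]
        have hInner := aInner_eq (by omega : 1 ≤ k) v 0 a0 a1
        rw [List.drop_zero] at hInner
        rw [mm_append, ih]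
        rw [hInner]

theorem bLoop_eq {k : Nat} (hk : 1 ≤ k) :
    ∀ (rest p : List (Int × Char)) (d : PySem.Dict Char (List Int)) (lo hi : Int),
      (∀ c, d.getD c [] = occ p c) →
      (lo, hi) = mm (10001, 0) (allSpans k p) →
      bLoop (k : Int) rest d lo hi = mm (10001, 0) (allSpans k (p ++ rest)) := by
  intro rest
  induction rest with
  | nil =>
      intro p d lo hi _ hacc
      rw [List.append_nil, bLoop]
      exact hacc
  | cons x rest ih =>
      intro p d lo hi hbuf hacc
      obtain ⟨i, c⟩ := x
      rw [bLoop]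
      simp only
      rw [hbuf c]
      have hocc_c : occ (p ++ [(i, c)]) c = occ p c ++ [i] := by rw [occ_append]; simp
      have hocc_ne : ∀ c', c' ≠ c → occ (p ++ [(i, c)]) c' = occ p c' := by
        intro c' hne
        rw [occ_append]
        have : (((i, c) : Int × Char).2 == c') = false := by simp [Ne.symm hne]
        rw [this]
        simp
      have hbuf' : ∀ c', (d.insert c (occ p c ++ [i])).getD c' [] = occ (p ++ [(i, c)]) c' := by
        intro c'
        rw [PySem.Dict.getD_insert]
        by_cases h : c' = c
        · subst h; rw [if_pos rfl, hocc_c]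
        · rw [if_neg h, hbuf c', hocc_ne c' h]
      have hlen1 : (occ p c ++ [i]).length = (occ p c).length + 1 := by simp
      have hsplit : p ++ (i, c) :: rest = (p ++ [(i, c)]) ++ rest := by simp
      by_cases hkm : k ≤ (occ p c).length + 1
      · -- a new span is emitted
        rw [if_pos (by rw [hlen1]; omega : ((occ p c ++ [i]).length : Int) ≥ ((k : Nat) : Int))]
        have hget : PySem.List.pyGet? (occ p c ++ [i]) (-((k : Nat) : Int))
            = some ((occ p c ++ [i]).getD ((occ p c).length + 1 - k) 0) := by
          rw [PySem.List.pyGet?_neg_natCast _ _ hk (by omega), hlen1]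
          rw [List.getD_eq_getElem _ 0 (by rw [hlen1]; omega)]
          rw [List.getElem?_eq_getElem (by rw [hlen1]; omega)]
        rw [hget]
        simp only
        have hspans_c : spans k (occ (p ++ [(i, c)]) c)
            = spans k (occ p c) ++ [i - (occ p c ++ [i]).getD ((occ p c).length + 1 - k) 0 + 1] := by
          rw [hocc_c]; exact spans_append hk hkm i
        have hAS : mm (10001, 0) (allSpans k (p ++ [(i, c)]))
            = mm (mm (10001, 0) (allSpans k p))
                [i - (occ p c ++ [i]).getD ((occ p c).length + 1 - k) 0 + 1] := by
          by_cases hcm : c ∈ p.map (fun q => q.2)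
          · have hchars : PySem.Set.ofList ((p ++ [(i, c)]).map (fun q => q.2))
                = PySem.Set.ofList (p.map (fun q => q.2)) := by
              rw [List.map_append]
              simp only [List.map_cons, List.map_nil]
              rw [PySem.Set.ofList_append_singleton,
                PySem.Set.add_of_mem ((PySem.Set.mem_ofList _ _).mpr hcm)]
            have hperm := flatMap_update_perm
              (f := fun c' => spans k (occ p c'))
              (f' := fun c' => spans k (occ (p ++ [(i, c)]) c'))
              (extra := [i - (occ p c ++ [i]).getD ((occ p c).length + 1 - k) 0 + 1])
              (PySem.Set.ofList (p.map (fun q => q.2))) (PySem.Set.nodup_ofList _)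
              ((PySem.Set.mem_ofList _ _).mpr hcm) hspans_c
              (fun d' _ hne => by
                show spans k (occ (p ++ [(i, c)]) d') = spans k (occ p d')
                rw [hocc_ne d' hne])
            unfold allSpans
            rw [hchars, mm_perm hperm, mm_append]
          · have ho0 : occ p c = [] := occ_of_not_mem hcm
            have hchars : PySem.Set.ofList ((p ++ [(i, c)]).map (fun q => q.2))
                = PySem.Set.ofList (p.map (fun q => q.2)) ++ [c] := by
              rw [List.map_append]
              simp only [List.map_cons, List.map_nil]
              rw [PySem.Set.ofList_append_singleton,
                PySem.Set.add_of_not_mem (fun h => hcm ((PySem.Set.mem_ofList _ _).mp h))]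
            unfold allSpans
            rw [hchars, List.flatMap_append]
            simp only [List.flatMap_cons, List.flatMap_nil, List.append_nil]
            rw [hspans_c]
            have hcongr : (PySem.Set.ofList (p.map (fun q => q.2))).flatMap
                  (fun c' => spans k (occ (p ++ [(i, c)]) c'))
                = (PySem.Set.ofList (p.map (fun q => q.2))).flatMap
                  (fun c' => spans k (occ p c')) := by
              apply List.flatMap_congr
              intro d' hd'
              have hne : d' ≠ c := fun h => hcm (h ▸ (PySem.Set.mem_ofList _ _).mp hd')
              show spans k (occ (p ++ [(i, c)]) d') = spans k (occ p d')
              rw [hocc_ne d' hne]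
            rw [hcongr, spans_nil_of_lt (by rw [ho0]; simpa using by omega), List.nil_append,
              mm_append]
        have hacc2 : ((if i - (occ p c ++ [i]).getD ((occ p c).length + 1 - k) 0 + 1 < lo
              then i - (occ p c ++ [i]).getD ((occ p c).length + 1 - k) 0 + 1 else lo),
            (if i - (occ p c ++ [i]).getD ((occ p c).length + 1 - k) 0 + 1 > hi
              then i - (occ p c ++ [i]).getD ((occ p c).length + 1 - k) 0 + 1 else hi))
            = mm (10001, 0) (allSpans k (p ++ [(i, c)])) := by
          rw [hAS, ← hacc, mm_cons, mm_nil]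
          rw [if_lt_eq_min, if_gt_eq_max]
        rw [hsplit]
        exact ih (p ++ [(i, c)]) _ _ _ hbuf' hacc2
      · -- no span emitted
        rw [if_neg (by rw [hlen1]; omega : ¬(((occ p c ++ [i]).length : Int) ≥ ((k : Nat) : Int)))]
        have hAS2 : allSpans k (p ++ [(i, c)]) = allSpans k p := by
          by_cases hcm : c ∈ p.map (fun q => q.2)
          · have hchars : PySem.Set.ofList ((p ++ [(i, c)]).map (fun q => q.2))
                = PySem.Set.ofList (p.map (fun q => q.2)) := by
              rw [List.map_append]
              simp only [List.map_cons, List.map_nil]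
              rw [PySem.Set.ofList_append_singleton,
                PySem.Set.add_of_mem ((PySem.Set.mem_ofList _ _).mpr hcm)]
            unfold allSpans
            rw [hchars]
            apply List.flatMap_congr
            intro d' _
            show spans k (occ (p ++ [(i, c)]) d') = spans k (occ p d')
            by_cases h : d' = c
            · subst h
              rw [hocc_c, spans_nil_of_lt (by simp; omega), spans_nil_of_lt (by omega)]
            · rw [hocc_ne d' h]
          · have ho0 : occ p c = [] := occ_of_not_mem hcm
            have hchars : PySem.Set.ofList ((p ++ [(i, c)]).map (fun q => q.2))
                = PySem.Set.ofList (p.map (fun q => q.2)) ++ [c] := by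
              rw [List.map_append]
              simp only [List.map_cons, List.map_nil]
              rw [PySem.Set.ofList_append_singleton,
                PySem.Set.add_of_not_mem (fun h => hcm ((PySem.Set.mem_ofList _ _).mp h))]
            unfold allSpans
            rw [hchars, List.flatMap_append]
            simp only [List.flatMap_cons, List.flatMap_nil, List.append_nil]
            rw [hocc_c, spans_nil_of_lt (by rw [ho0]; simp; omega)]
            rw [List.append_nil]
            apply List.flatMap_congr
            intro d' hd'
            have hne : d' ≠ c := fun h => hcm (h ▸ (PySem.Set.mem_ofList _ _).mp hd')
            show spans k (occ (p ++ [(i, c)]) d') = spans k (occ p d')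
            rw [hocc_ne d' hne]
        rw [hsplit]
        exact ih (p ++ [(i, c)]) _ _ _ hbuf' (by rw [hAS2]; exact hacc)

theorem mm_ones' : ∀ (S : List Int), (∀ x ∈ S, x = 1) → mm (1, 1) S = (1, 1) := by
  intro S
  induction S with
  | nil => intro; rfl
  | cons x t ih =>
      intro h
      have hx : x = 1 := h x (by simp)
      rw [mm_cons, hx]
      simp only [min_self, max_self]
      exact ih (fun y hy => h y (by simp [hy]))

theorem mm_ones {S : List Int} (h : ∀ x ∈ S, x = 1) (hne : S ≠ []) : mm (10001, 0) S = (1, 1) := by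
  cases S with
  | nil => exact absurd rfl hne
  | cons x t =>
      have hx : x = 1 := h x (by simp)
      rw [mm_cons, hx]
      norm_num
      exact mm_ones' t (fun y hy => h y (by simp [hy]))

theorem main_eq (W : String) (K : Int) (hpre : Pre_solution W K) :
    solution W K = solution_alt W K := by
  by_cases hW : W.toList = []
  · simp only [solution, solution_alt]
    rw [hW]
    rfl
  · have hK : 1 ≤ K := by
      rcases hpre with h | h
      · exact h
      · exact absurd h hW
    obtain ⟨k, rfl⟩ : ∃ k : Nat, K = (k : Int) := ⟨K.toNat, (Int.toNat_of_nonneg (by omega)).symm⟩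
    have hk : 1 ≤ k := by omega
    simp only [solution, solution_alt]
    rw [ref_values W.toList]
    have hB := bLoop_eq hk (PySem.List.enumerate W.toList) [] PySem.Dict.empty 10001 0
      (fun c => by rw [PySem.Dict.getD_empty]; simp [occ]) (by rfl)
    rw [List.nil_append] at hB
    rw [hB]
    by_cases hk1 : k = 1
    · subst hk1
      obtain ⟨ch, tl, hWl⟩ := List.exists_cons_of_ne_nil hW
      rw [hWl]
      have hv1len : (occ (PySem.List.enumerate (ch :: tl)) ch).length = (ch :: tl).count ch :=
        occ_enumerate_length ch (ch :: tl) 0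
      have hpos : 0 < (occ (PySem.List.enumerate (ch :: tl)) ch).length := by
        rw [hv1len]
        simp
      rw [PySem.Set.ofList_cons, List.map_cons, aLoop]
      rw [if_neg (by omega : ¬(((occ (PySem.List.enumerate (ch :: tl)) ch).length : Int) < ((1 : Nat) : Int)))]
      rw [if_pos (by norm_num : ((((1 : Nat) : Int)) == (1 : Int)) = true)]
      have hall1 : ∀ x ∈ allSpans 1 (PySem.List.enumerate (ch :: tl)), x = 1 := by
        intro x hx
        unfold allSpans at hx
        rw [List.mem_flatMap] at hx
        obtain ⟨c', _, hx⟩ := hx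
        exact spans_one_all_ones hx
      have hne : allSpans 1 (PySem.List.enumerate (ch :: tl)) ≠ [] := by
        unfold allSpans
        intro hnil
        rw [List.flatMap_eq_nil_iff] at hnil
        have hch : ch ∈ PySem.Set.ofList ((PySem.List.enumerate (ch :: tl)).map (fun q => q.2)) := by
          rw [PySem.List.map_snd_enumerate]
          exact (PySem.Set.mem_ofList _ _).mpr (by simp)
        have h0 := hnil _ hch
        have hlen : (spans 1 (occ (PySem.List.enumerate (ch :: tl)) ch)).length = 0 := by
          rw [h0]; rfl
        simp only [spans, List.length_map, List.length_range] at hlen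
        omega
      rw [mm_ones hall1 hne]
    · have hk2 : 2 ≤ k := by omega
      rw [aLoop_eq hk2, List.flatMap_map]
      unfold allSpans
      rw [PySem.List.map_snd_enumerate]

-- ===== VERDICT (by name: the statement is the Claim_ definition above) =====
theorem solution_spec : Claim_equal_solution := by
  intro W K _ hpre
  unfold Spec_solution
  exact main_eq W K hpre
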